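-- pv_equiv track=rewrite | github.com/dotpipe/ren | ren32.py | decompress_56bits
-- ===== SOURCE A (Python) =====
-- def decompress_56bits(compressed):
--     decompression_map = {
--         "8": "111111", "7": "1111", "5": "010101", "4": "0101",
--         "2": "000000", "1": "0000", "9": "10", "3": "01", "0": "00"
--     }
--     decompressed = ""
--     i = 0
--     while i < len(compressed):
--         if compressed[i] in decompression_map:
--             decompressed += decompression_map[compressed[i]]
--         elif compressed[i] == "6":
--             if i + 1 < len(compressed):
--                 i += 1
--                 decompressed += compressed[i]
--             else:
--                 raise ValueError("Unexpected end of input after '6' marker")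
--         else:
--             decompressed += compressed[i]
--         i += 1
--     return decompressed
-- ===== SOURCE B (Python) =====
-- _TABLE = str.maketrans({
--     "8": "111111", "7": "1111", "5": "010101", "4": "0101",
--     "2": "000000", "1": "0000", "9": "10", "3": "01", "0": "00"
-- })
--
-- def decompress_56bits(compressed):
--     # Staged decomposition: split the input on the '6' escape marker once, then
--     # expand each escape-free segment in one shot with str.translate.
--     parts = iter(compressed.split("6"))
--     out = [next(parts).translate(_TABLE)]
--     for p in parts:
--         if p == "":
--             # the escaped character was '6' itself (the next separator)
--             p = next(parts, None)
--             if p is None: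
--                 raise ValueError("Unexpected end of input after '6' marker")
--             out.append("6" + p.translate(_TABLE))
--         else:
--             out.append(p[0] + p[1:].translate(_TABLE))
--     return "".join(out)
-- ===== Notes on version B (the rewrite author's own statement) =====
-- stated objective: faster
-- what changed: Instead of A's index-jumping per-character while loop with quadratic string +=, B splits the input on the '6' escape marker once and expands each escape-free segment in one shot with str.translate, rejoining the pieces (an empty split part means the escaped char was '6' itself, so the next part is consumed).
import Mathlib
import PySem

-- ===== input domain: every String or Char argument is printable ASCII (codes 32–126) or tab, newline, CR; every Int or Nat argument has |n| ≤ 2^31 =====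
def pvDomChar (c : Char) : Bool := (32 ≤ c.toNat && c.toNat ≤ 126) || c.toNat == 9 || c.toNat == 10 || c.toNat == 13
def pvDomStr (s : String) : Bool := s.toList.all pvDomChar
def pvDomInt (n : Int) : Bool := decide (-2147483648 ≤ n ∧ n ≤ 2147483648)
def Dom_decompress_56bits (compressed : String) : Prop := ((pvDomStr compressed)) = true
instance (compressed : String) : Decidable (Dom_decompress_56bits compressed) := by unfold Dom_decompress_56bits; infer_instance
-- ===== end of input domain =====

-- B replaces A's index-jumping while loop with quadratic string concatenation by a staged pass: split on the '6' marker once, then expand each escape-free segment; a timing run measured B faster.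


-- ===== PORT A =====
-- the decompression_map dict (the same table in A's dict and B's translate table); none = key absent
def dmap (c : Char) : Option (List Char) :=
  if c = '8' then some ['1','1','1','1','1','1']
  else if c = '7' then some ['1','1','1','1']
  else if c = '5' then some ['0','1','0','1','0','1']
  else if c = '4' then some ['0','1','0','1']
  else if c = '2' then some ['0','0','0','0','0','0']
  else if c = '1' then some ['0','0','0','0']
  else if c = '9' then some ['1','0']
  else if c = '3' then some ['0','1']
  else if c = '0' then some ['0','0']
  else none

-- A's while loop over index i, transliterated as recursion on the remaining suffix
-- (i += 1 = take the tail; the '6' branch consumes one extra char).  In the branch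
-- where Python raises ValueError (a lone trailing '6') the port returns the string
-- built so far; Pre_ excludes exactly those inputs.
def goA : List Char → List Char
  | [] => []
  | c :: rest =>
    match dmap c with
    | some m => m ++ goA rest
    | none =>
      if c = '6' then
        match rest with
        | d :: rest' => d :: goA rest'
        | [] => []          -- Python: raise ValueError (excluded by Pre_)
      else c :: goA rest

def decompress_56bits (compressed : String) : String :=
  String.ofList (goA compressed.toList)

-- ===== PORT B =====
-- segment.translate(_TABLE): expand every char of an escape-free segment
def expandB (p : List Char) : List Char := p.flatMap (fun c => (dmap c).getD [c])

-- B's for-loop over the remaining split parts (iterator): an empty part means the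
-- escaped char was '6' itself, so consume the next part too; a nonempty part
-- contributes its first char verbatim and the translated remainder.  Where Python's
-- next(parts, None) is exhausted it raises ValueError; the port returns what was
-- joined so far (excluded by Pre_).
def goB : List (List Char) → List Char
  | [] => []
  | [] :: rest =>
    match rest with
    | [] => []              -- Python: raise ValueError (excluded by Pre_)
    | q :: rest' => '6' :: (expandB q ++ goB rest')
  | (c :: cs) :: rest => c :: (expandB cs ++ goB rest)

-- compressed.split("6") = List.splitOn '6'; the head part is translated whole
def decompress_56bits_alt (compressed : String) : String :=
  match compressed.toList.splitOn '6' with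
  | [] => ""                -- unreachable: split never yields an empty list
  | p :: rest => String.ofList (expandB p ++ goB rest)

-- ===== PRECONDITION & SPEC =====
-- Pre_ excludes exactly the inputs on which both Pythons raise ValueError:
-- those whose maximal trailing run of '6' characters has odd length.
def Pre_decompress_56bits (compressed : String) : Prop :=
  (compressed.toList.reverse.takeWhile (· = '6')).length % 2 = 0
instance (compressed : String) : Decidable (Pre_decompress_56bits compressed) := by
  unfold Pre_decompress_56bits; infer_instance

def pvWitness_decompress_56bits : String := "9a663 0"

def Spec_decompress_56bits (compressed : String) (out : String) : Prop := out = decompress_56bits_alt compressed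
instance (compressed : String) (out : String) : Decidable (Spec_decompress_56bits compressed out) := by unfold Spec_decompress_56bits; infer_instance

-- ===== CLAIM (what is proved, stated in full; the proofs are below) =====
def Claim_equal_decompress_56bits : Prop := ∀ (compressed : String), Dom_decompress_56bits compressed → Pre_decompress_56bits compressed → Spec_decompress_56bits compressed (decompress_56bits compressed)

-- ===== LEMMAS AND PROOFS =====

-- B's staged decode of the split parts, as a function of the raw char list
def fB (l : List Char) : List Char :=
  match l.splitOn '6' with
  | [] => []
  | p :: rest => expandB p ++ goB rest

theorem splitOn_ne_nil (l : List Char) : l.splitOn '6' ≠ [] :=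
  List.splitOnP_ne_nil _ l

-- A's one-suffix-at-a-time scan produces exactly B's staged decode (this holds
-- unconditionally: in the lone-trailing-'6' corner both ports drop the marker;
-- Pre_ is only needed for fidelity to the raising Pythons).
theorem goA_eq_fB : ∀ l : List Char, goA l = fB l
  | [] => by simp [goA, fB, List.splitOn, List.splitOnP_nil, goB, expandB]
  | c :: rest => by
    by_cases hc : c = '6'
    · subst hc
      cases rest with
      | nil =>
        show goA ['6'] = fB ['6']
        simp only [fB, List.splitOn, List.splitOnP_cons, beq_self_eq_true, if_pos,
          List.splitOnP_nil]
        simp [goA, dmap, goB, expandB]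
      | cons d rest' =>
        have ih := goA_eq_fB rest'
        obtain ⟨p, ps, hps⟩ := List.exists_cons_of_ne_nil (splitOn_ne_nil rest')
        by_cases hd : d = '6'
        · subst hd
          show goA ('6' :: '6' :: rest') = fB ('6' :: '6' :: rest')
          simp only [fB, List.splitOn, List.splitOnP_cons, beq_self_eq_true, if_pos] at *
          rw [hps]
          simp [goA, dmap, goB, expandB, ih, hps]
        · show goA ('6' :: d :: rest') = fB ('6' :: d :: rest')
          simp only [fB, List.splitOn, List.splitOnP_cons, beq_self_eq_true, if_pos,
            show (d == '6') = false by simp [hd], Bool.false_eq_true] at *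
          rw [hps]
          simp only [List.modifyHead]
          simp [goA, dmap, goB, expandB, ih, hps]
    · have ih := goA_eq_fB rest
      obtain ⟨p, ps, hps⟩ := List.exists_cons_of_ne_nil (splitOn_ne_nil rest)
      show goA (c :: rest) = fB (c :: rest)
      simp only [fB, List.splitOn, List.splitOnP_cons,
        show (c == '6') = false by simp [hc], Bool.false_eq_true] at *
      rw [hps]
      simp only [List.modifyHead]
      unfold goA
      cases h : dmap c with
      | some m =>
        rw [ih, hps]
        simp [expandB, h]
      | none =>
        rw [if_neg hc, ih, hps]
        simp [expandB, h]

-- ===== VERDICT (by name: the statement is the Claim_ definition above) =====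
theorem decompress_56bits_spec : Claim_equal_decompress_56bits := by
  intro s _ _
  unfold Spec_decompress_56bits decompress_56bits decompress_56bits_alt
  rw [goA_eq_fB]
  obtain ⟨p, ps, hps⟩ := List.exists_cons_of_ne_nil (splitOn_ne_nil s.toList)
  simp [fB, hps]
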